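-- pv_equiv track=rewrite | github.com/SteinVandenbroeke/PDTeam3 | Flask_server/src/ProgDBTutor/ABTest.py | history_from_subset_interactions
-- ===== SOURCE A (Python) =====
-- from typing import List
--
-- def history_from_subset_interactions(interactions, amt_users=5) -> List[List]:
--     """
--     history_from_subset_interactions: Take the history of the first users in the dataset and return as list of lists
--     @param interactions: all previous interaction of users
--     @param amt_users: How many users that have to be checked
--     """
--     user_histories = dict()
--
--     for user_id, item_id in interactions:
--         if len(user_histories) < amt_users and user_id not in user_histories:
--             user_histories[user_id] = list()
--
--         if user_id in user_histories:
--             user_histories[user_id].append(item_id)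
--
--     return list(user_histories.keys()), list(user_histories.values())
-- ===== SOURCE B (Python) =====
-- def history_from_subset_interactions(interactions, amt_users=5):
--     # select-then-gather: pick the first amt_users distinct users, then
--     # gather each selected user's items with a comprehension.
--     selected = []
--     for user_id, _ in interactions:
--         if len(selected) < amt_users and user_id not in selected:
--             selected.append(user_id)
--     histories = [[item for user, item in interactions if user == u] for u in selected]
--     return selected, histories
-- ===== Notes on version B (the rewrite author's own statement) =====
-- stated objective: simpler
-- what changed: Replaces the single interleaved dict-building loop with a select-then-gather decomposition: one pass picks the first amt_users distinct users, then each selected user's history is a plain filter comprehension over the interactions.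
import Mathlib
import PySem

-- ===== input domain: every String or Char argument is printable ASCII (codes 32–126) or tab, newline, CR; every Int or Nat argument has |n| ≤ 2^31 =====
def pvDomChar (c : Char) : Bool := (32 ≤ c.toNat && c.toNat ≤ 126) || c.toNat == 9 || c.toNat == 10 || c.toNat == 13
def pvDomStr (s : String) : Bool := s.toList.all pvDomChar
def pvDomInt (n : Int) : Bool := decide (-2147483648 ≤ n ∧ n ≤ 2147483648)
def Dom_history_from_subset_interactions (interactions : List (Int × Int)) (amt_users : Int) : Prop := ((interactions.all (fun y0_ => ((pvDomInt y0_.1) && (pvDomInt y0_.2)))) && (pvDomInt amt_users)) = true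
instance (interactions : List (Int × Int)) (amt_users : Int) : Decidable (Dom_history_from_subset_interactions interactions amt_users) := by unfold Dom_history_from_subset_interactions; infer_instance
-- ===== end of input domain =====

-- B replaces A's interleaved dict-building loop by a select-then-gather decomposition (simpler); same return value.


-- ===== PORT A =====
-- one iteration of A's for-loop over (user_id, item_id)
def pvStepA (amt_users : Int) (d : PySem.Dict Int (List Int)) (p : Int × Int) : PySem.Dict Int (List Int) :=
  let d1 := if (d.size : Int) < amt_users ∧ ¬ d.contains p.1 then d.insert p.1 [] else d
  if d1.contains p.1 then d1.modify p.1 [] (fun l => l ++ [p.2]) else d1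

def history_from_subset_interactions (interactions : List (Int × Int)) (amt_users : Int) : List Int × List (List Int) :=
  let user_histories := interactions.foldl (pvStepA amt_users) PySem.Dict.empty
  (user_histories.keys, user_histories.values)

-- ===== PORT B =====
-- B's first pass: collect the first amt_users distinct user ids (seen = selected-so-far)
def pvSelect (amt_users : Int) (xs : List (Int × Int)) (seen : List Int) : List Int :=
  xs.foldl (fun s p => if (s.length : Int) < amt_users ∧ p.1 ∉ s then s ++ [p.1] else s) seen

def history_from_subset_interactions_alt (interactions : List (Int × Int)) (amt_users : Int) : List Int × List (List Int) :=
  let selected := pvSelect amt_users interactions []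
  (selected, selected.map (fun u => (interactions.filter (fun p => p.1 == u)).map (·.2)))

-- ===== PRECONDITION & SPEC =====
def Spec_history_from_subset_interactions (interactions : List (Int × Int)) (amt_users : Int) (out : List Int × List (List Int)) : Prop := out = history_from_subset_interactions_alt interactions amt_users
instance (interactions : List (Int × Int)) (amt_users : Int) (out : List Int × List (List Int)) : Decidable (Spec_history_from_subset_interactions interactions amt_users out) := by unfold Spec_history_from_subset_interactions; infer_instance

-- ===== CLAIM (what is proved, stated in full; the proofs are below) =====
def Claim_equal_history_from_subset_interactions : Prop := ∀ (interactions : List (Int × Int)) (amt_users : Int), Dom_history_from_subset_interactions interactions amt_users → Spec_history_from_subset_interactions interactions amt_users (history_from_subset_interactions interactions amt_users)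

-- ===== LEMMAS AND PROOFS =====

-- once the cap is reached, B's selection pass adds nobody
lemma pvSelect_of_ge (amt : Int) (xs : List (Int × Int)) (seen : List Int)
    (h : ¬ ((seen.length : Int) < amt)) : pvSelect amt xs seen = seen := by
  induction xs with
  | nil => rfl
  | cons x rest ih =>
    simp only [pvSelect, List.foldl_cons] at *
    rw [if_neg (fun hc => h hc.1)]
    exact ih

-- invariant of A's loop: keys are exactly B's selection continued from the
-- current keys, and each present user's history is its old one plus all of
-- its items in the remaining suffix
lemma foldA_char (amt : Int) (xs : List (Int × Int)) :
    ∀ (d : PySem.Dict Int (List Int)), d.keys.Nodup →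
    ((xs.foldl (pvStepA amt) d).keys = pvSelect amt xs d.keys ∧
     (xs.foldl (pvStepA amt) d).keys.Nodup ∧
     ∀ u ∈ (xs.foldl (pvStepA amt) d).keys,
       (xs.foldl (pvStepA amt) d).getD u [] =
         d.getD u [] ++ ((xs.filter (fun p => p.1 == u)).map (·.2))) := by
  induction xs with
  | nil =>
    intro d hnd
    refine ⟨rfl, hnd, ?_⟩
    intro u _
    simp
  | cons x rest ih =>
    intro d hnd
    by_cases hmem : d.contains x.1 = true
    · -- existing user: only the append fires
      have hstep : pvStepA amt d x = d.modify x.1 [] (fun l => l ++ [x.2]) := by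
        simp only [pvStepA]
        rw [if_neg (show ¬ ((d.size : Int) < amt ∧ ¬ d.contains x.1 = true) from
              fun hc => hc.2 hmem),
            if_pos hmem]
      have hin : x.1 ∈ d.keys := (PySem.Dict.contains_iff_mem_keys d x.1).1 hmem
      have hkeys' : (d.modify x.1 [] (fun l => l ++ [x.2])).keys = d.keys := by
        rw [PySem.Dict.keys_modify, PySem.Dict.keys_insert_of_contains d _ hmem]
      have hnd' : (d.modify x.1 [] (fun l => l ++ [x.2])).keys.Nodup := by
        rwa [hkeys']
      obtain ⟨hk, hnd2, hv⟩ := ih (d.modify x.1 [] (fun l => l ++ [x.2])) hnd'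
      simp only [List.foldl_cons, hstep]
      refine ⟨?_, hnd2, ?_⟩
      · rw [hk, hkeys']
        simp only [pvSelect, List.foldl_cons]
        rw [if_neg (by simp [hin])]
      · intro u hu
        rw [hv u hu, PySem.Dict.getD_modify]
        by_cases huu : u = x.1
        · subst huu
          simp
        · rw [if_neg huu]
          have hne : (x.1 == u) = false := by simp [Ne.symm huu]
          simp [hne]
    · have hmemf : d.contains x.1 = false := by simpa using hmem
      by_cases hcap : (d.size : Int) < amt
      · -- new user under the cap: insert then append
        have hstep : pvStepA amt d x =
            (d.insert x.1 []).modify x.1 [] (fun l => l ++ [x.2]) := by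
          simp only [pvStepA]
          rw [if_pos (show ((d.size : Int) < amt ∧ ¬ d.contains x.1 = true) from ⟨hcap, hmem⟩),
              if_pos (PySem.Dict.contains_insert_self d x.1 [])]
        set d' := (d.insert x.1 []).modify x.1 [] (fun l => l ++ [x.2]) with hd'
        have hkeys' : d'.keys = d.keys ++ [x.1] := by
          rw [hd', PySem.Dict.keys_modify,
              PySem.Dict.keys_insert_of_contains _ _ (PySem.Dict.contains_insert_self d x.1 []),
              PySem.Dict.keys_insert_of_not_contains d [] hmemf]
        have hnins : x.1 ∉ d.keys := fun h => hmem ((PySem.Dict.contains_iff_mem_keys d x.1).2 h)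
        have hnd' : d'.keys.Nodup := by
          rw [hkeys']
          simp only [List.nodup_append, List.nodup_cons, List.nodup_nil, and_true]
          exact ⟨hnd, List.not_mem_nil, fun a ha b hb => by simp at hb; exact fun hab => hnins ((hb ▸ hab) ▸ ha)⟩
        obtain ⟨hk, hnd2, hv⟩ := ih d' hnd'
        simp only [List.foldl_cons, hstep]
        refine ⟨?_, hnd2, ?_⟩
        · rw [hk, hkeys']
          simp only [pvSelect, List.foldl_cons]
          have hlen : (d.keys.length : Int) = (d.size : Int) := by
            simp [PySem.Dict.size, PySem.Dict.keys]
          rw [if_pos ⟨by rw [hlen]; exact hcap, hnins⟩]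
        · intro u hu
          rw [hv u hu, hd', PySem.Dict.getD_modify]
          by_cases huu : u = x.1
          · subst huu
            rw [if_pos rfl, PySem.Dict.getD_insert_self,
                PySem.Dict.getD_of_not_contains d [] hmemf]
            simp
          · rw [if_neg huu, PySem.Dict.getD_insert_of_ne d [] [] huu]
            have hne : (x.1 == u) = false := by simp [Ne.symm huu]
            simp [hne]
      · -- cap reached and user unknown: nothing happens
        have hstep : pvStepA amt d x = d := by
          simp only [pvStepA]
          rw [if_neg (show ¬ ((d.size : Int) < amt ∧ ¬ d.contains x.1 = true) from
              fun hc => hcap hc.1),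
              if_neg hmem]
        obtain ⟨hk, hnd2, hv⟩ := ih d hnd
        have hlen : (d.keys.length : Int) = (d.size : Int) := by
          simp [PySem.Dict.size, PySem.Dict.keys]
        have hcapk : ¬ ((d.keys.length : Int) < amt) := by rw [hlen]; exact hcap
        have hsel : pvSelect amt rest d.keys = d.keys := pvSelect_of_ge amt rest d.keys hcapk
        simp only [List.foldl_cons, hstep]
        refine ⟨?_, hnd2, ?_⟩
        · rw [hk]
          simp only [pvSelect, List.foldl_cons]
          rw [if_neg (fun hc => hcapk hc.1)]
        · intro u hu
          have humem : u ∈ d.keys := by rw [hk, hsel] at hu; exact hu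
          have hne : (x.1 == u) = false := by
            simp only [beq_eq_false_iff_ne, ne_eq]
            exact fun h => hmem ((PySem.Dict.contains_iff_mem_keys d x.1).2 (h ▸ humem))
          rw [hv u hu]
          simp [hne]

-- ===== VERDICT (by name: the statement is the Claim_ definition above) =====
theorem history_from_subset_interactions_spec : Claim_equal_history_from_subset_interactions := by
  intro interactions amt_users _
  unfold Spec_history_from_subset_interactions
  obtain ⟨hk, hnd, hv⟩ :=
    foldA_char amt_users interactions PySem.Dict.empty PySem.Dict.nodup_keys_empty
  rw [PySem.Dict.keys_empty] at hk
  unfold history_from_subset_interactions history_from_subset_interactions_alt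
  simp only
  refine Prod.ext hk ?_
  rw [PySem.Dict.values_eq_map_keys _ hnd [], hk]
  refine List.map_congr_left ?_
  intro u hu
  rw [hv u (by rw [hk]; exact hu)]
  simp
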